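-- pv_equiv track=rewrite | github.com/znelson/advent-of-code | 2023/day07.py | make_card_counts
-- ===== SOURCE A (Python) =====
-- import functools
--
-- card_nums = {
--     'A': 14,
--     'K': 13,
--     'Q': 12,
--     'J': 11,
--     'T': 10,
-- }
--
-- def card_to_num(card, overrides={}):
--     if card in overrides:
--         return overrides[card]
--     if card in card_nums:
--         return card_nums[card]
--     return int(card)
--
-- def compare_card_counts(one, two):
--     if one[1] > two[1]:
--         return 1
--     elif one[1] < two[1]:
--         return -1
--     elif one[0] > two[0]:
--         return 1
--     elif one[0] < two[0]:
--         return -1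
--     return 0
--
-- def make_card_counts(cards_str):
--     count_map = {}
--     cards = [card_to_num(c) for c in cards_str]
--     cards.sort()
--     for card in cards:
--         if card not in count_map:
--             count_map[card] = 1
--         else:
--             count_map[card] += 1
--     card_counts = [(k, v) for (k, v) in count_map.items()]
--     card_counts.sort(key=functools.cmp_to_key(compare_card_counts), reverse=True)
--     return card_counts
-- ===== SOURCE B (Python) =====
-- card_nums = {
--     'A': 14,
--     'K': 13,
--     'Q': 12,
--     'J': 11,
--     'T': 10,
-- }
--
-- def card_to_num(card, overrides={}):
--     if card in overrides:
--         return overrides[card]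
--     if card in card_nums:
--         return card_nums[card]
--     return int(card)
--
-- def make_card_counts(cards_str):
--     # counting-sort / bucket strategy: card values live in the fixed range 0..14,
--     # so tally them into a 15-slot array (no dict, no comparison sort), then emit
--     # (value, count) pairs bucket by bucket: count descending, value descending.
--     n = len(cards_str)
--     tally = [0] * 15
--     for c in cards_str:
--         tally[card_to_num(c)] += 1
--     result = []
--     for k in range(n, 0, -1):
--         for v in range(14, -1, -1):
--             if tally[v] == k:
--                 result.append((v, k))
--     return result
-- ===== Notes on version B (the rewrite author's own statement) =====
-- stated objective: alternative
-- what changed: B replaces A's sort-the-cards + dict-counting + comparator sort with a counting-sort/bucket scheme: card values are tallied into a fixed 15-slot array and the (value, count) pairs are emitted bucket by bucket (count descending, value descending), so B performs no comparison sort and builds no dict at all.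
import Mathlib
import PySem

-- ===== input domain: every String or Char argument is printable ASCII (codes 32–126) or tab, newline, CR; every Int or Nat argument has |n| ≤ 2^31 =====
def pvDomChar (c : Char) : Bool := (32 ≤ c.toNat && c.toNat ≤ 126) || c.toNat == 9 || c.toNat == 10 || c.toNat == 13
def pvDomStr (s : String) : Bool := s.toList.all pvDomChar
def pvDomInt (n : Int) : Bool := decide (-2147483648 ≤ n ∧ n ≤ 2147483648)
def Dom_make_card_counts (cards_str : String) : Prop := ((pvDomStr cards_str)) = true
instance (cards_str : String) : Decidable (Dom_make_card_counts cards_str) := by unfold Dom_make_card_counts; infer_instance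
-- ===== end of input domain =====

-- B replaces A's sort + dict-counting + comparator sort by a counting-sort/bucket scheme
-- over the fixed card-value range 0..14 (no dict, no comparison sort).

-- ===== PORT A =====
def card_nums : PySem.Dict String Int :=
  PySem.Dict.ofList [("A", 14), ("K", 13), ("Q", 12), ("J", 11), ("T", 10)]

-- int(card) raises ValueError on non-digit single characters; Pre_ excludes that, .getD 0 is never reached there
def card_to_num (card : String) (overrides : PySem.Dict String Int) : Int :=
  if overrides.contains card then (overrides.get? card).getD 0
  else if card_nums.contains card then (card_nums.get? card).getD 0
  else (PySem.Int.ofStr? card).getD 0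

def compare_card_counts (one two : Int × Int) : Int :=
  if one.2 > two.2 then 1
  else if one.2 < two.2 then -1
  else if one.1 > two.1 then 1
  else if one.1 < two.1 then -1
  else 0

def make_card_counts (cards_str : String) : List (Int × Int) :=
  let cards := cards_str.toList.map (fun c => card_to_num (String.ofList [c]) PySem.Dict.empty)
  let cards := PySem.List.sorted cards (fun v => v) false
  let count_map := cards.foldl
    (fun d card => if d.contains card then d.insert card (d.getD card 0 + 1) else d.insert card 1)
    PySem.Dict.empty
  let card_counts := count_map.items.map (fun kv => (kv.1, kv.2))
  -- card_counts.sort(key=functools.cmp_to_key(compare_card_counts), reverse=True): stable insertion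
  -- sort in PySem.List.sorted's shape, with 'x before y iff compare_card_counts x y > 0' (exact:
  -- reverse=True with a comparator key places x before y iff cmp(x,y) > 0, ties keeping original order)
  card_counts.foldl
    (fun acc p => PySem.List.insertBy (fun a b => decide (0 < compare_card_counts a b)) p acc) []

-- ===== PORT B =====
-- tally[card_to_num(c)] += 1  — the index is 0..14 whenever card_to_num returns (digits give
-- 0..9, faces 10..14), so .natAbs is exact on every input admitted by Pre_
def tallyStep (t : List Int) (c : Char) : List Int :=
  let v := card_to_num (String.ofList [c]) PySem.Dict.empty
  t.set v.natAbs (t.getD v.natAbs 0 + 1)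

def make_card_counts_alt (cards_str : String) : List (Int × Int) :=
  let n := PySem.Str.len cards_str
  let tally := cards_str.toList.foldl tallyStep (List.replicate 15 0)
  (PySem.List.pyRange n 0 (-1)).foldl (fun acc k =>
    (PySem.List.pyRange 14 (-1) (-1)).foldl (fun acc v =>
      if PySem.List.pyGetD tally v 0 == k then acc ++ [(v, k)] else acc) acc) []

-- ===== PRECONDITION & SPEC =====
-- Pre_ excludes exactly the strings containing a character that is neither a face card
-- (A/K/Q/J/T) nor a decimal digit: on those int(card) raises ValueError in A (and in B).
def Pre_make_card_counts (cards_str : String) : Prop :=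
  (cards_str.toList.all (fun c =>
    c == 'A' || c == 'K' || c == 'Q' || c == 'J' || c == 'T' || c.isDigit)) = true
instance (cards_str : String) : Decidable (Pre_make_card_counts cards_str) := by
  unfold Pre_make_card_counts; infer_instance

def pvWitness_make_card_counts : String := "32T3K"

def Spec_make_card_counts (cards_str : String) (out : List (Int × Int)) : Prop := out = make_card_counts_alt cards_str
instance (cards_str : String) (out : List (Int × Int)) : Decidable (Spec_make_card_counts cards_str out) := by unfold Spec_make_card_counts; infer_instance

-- ===== CLAIM (what is proved, stated in full; the proofs are below) =====
def Claim_equal_make_card_counts : Prop := ∀ (cards_str : String), Dom_make_card_counts cards_str → Pre_make_card_counts cards_str → Spec_make_card_counts cards_str (make_card_counts cards_str)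

-- ===== LEMMAS AND PROOFS =====

-- the lexicographic sort key (count, value) that A's comparator implements
def pairKey (p : Int × Int) : Lex (Int × Int) := toLex (p.2, p.1)

-- B's bucket emission, as a flatMap with the tally lookup replaced by the count it computes
def bucket (vals : List Int) : List (Int × Int) :=
  (PySem.List.pyRange (vals.length : Int) 0 (-1)).flatMap (fun k =>
    ((PySem.List.pyRange 14 (-1) (-1)).filter (fun v => decide ((vals.count v : Int) = k))).map
      (fun v => (v, k)))

-- A's counting loop is collections.Counter
lemma fold_count_eq_counter (l : List Int) :
    l.foldl (fun d card => if d.contains card then d.insert card (d.getD card 0 + 1)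
                           else d.insert card 1) PySem.Dict.empty
      = PySem.Dict.counter l := by
  have hf : (fun (d : PySem.Dict Int Int) card =>
      if d.contains card then d.insert card (d.getD card 0 + 1) else d.insert card 1)
      = fun d card => d.insert card (d.getD card 0 + 1) := by
    funext d card
    by_cases h : d.contains card = true
    · simp [h]
    · simp only [Bool.not_eq_true] at h
      simp [h, PySem.Dict.getD_of_not_contains d 0 h]
  rw [hf, PySem.Dict.foldl_insert_getD_add_one_eq_counter]

-- A's comparator-descending insertion is insertion by 'pairKey b < pairKey a'
lemma before_eq :
    (fun a b : Int × Int => decide (0 < compare_card_counts a b))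
      = fun a b : Int × Int => decide (pairKey b < pairKey a) := by
  funext a b
  unfold compare_card_counts pairKey
  simp only [Prod.Lex.toLex_lt_toLex]
  split_ifs <;> simp <;> omega

lemma char_eq_of_toNat (c d : Char) (h : c.toNat = d.toNat) : c = d :=
  Char.ext (UInt32.toNat_inj.mp h)

-- every value card_to_num returns on a Pre_-admitted character lies in 0..14
lemma card_val_range (c : Char)
    (hc : (c == 'A' || c == 'K' || c == 'Q' || c == 'J' || c == 'T' || c.isDigit) = true) :
    0 ≤ card_to_num (String.ofList [c]) PySem.Dict.empty ∧ card_to_num (String.ofList [c]) PySem.Dict.empty < 15 := by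
  simp only [Bool.or_eq_true, beq_iff_eq] at hc
  rcases hc with ((((h|h)|h)|h)|h) | h
  · subst h; decide
  · subst h; decide
  · subst h; decide
  · subst h; decide
  · subst h; decide
  · have h48 : 48 ≤ c.toNat ∧ c.toNat ≤ 57 := by
      simp [Char.isDigit, UInt32.le_iff_toNat_le] at h
      exact ⟨h.1, h.2⟩
    obtain ⟨h1, h2⟩ := h48
    interval_cases h : c.toNat
    · rw [char_eq_of_toNat c '0' (by rw [h]; decide)]; decide
    · rw [char_eq_of_toNat c '1' (by rw [h]; decide)]; decide
    · rw [char_eq_of_toNat c '2' (by rw [h]; decide)]; decide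
    · rw [char_eq_of_toNat c '3' (by rw [h]; decide)]; decide
    · rw [char_eq_of_toNat c '4' (by rw [h]; decide)]; decide
    · rw [char_eq_of_toNat c '5' (by rw [h]; decide)]; decide
    · rw [char_eq_of_toNat c '6' (by rw [h]; decide)]; decide
    · rw [char_eq_of_toNat c '7' (by rw [h]; decide)]; decide
    · rw [char_eq_of_toNat c '8' (by rw [h]; decide)]; decide
    · rw [char_eq_of_toNat c '9' (by rw [h]; decide)]; decide

-- the tally fold maintains, at every slot j < 15, base value plus the count of j so far
lemma tally_inv (l : List Char) : ∀ (t : List Int), t.length = 15 →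
    (∀ c ∈ l, 0 ≤ card_to_num (String.ofList [c]) PySem.Dict.empty ∧ card_to_num (String.ofList [c]) PySem.Dict.empty < 15) → ∀ j : Nat, j < 15 →
    (l.foldl tallyStep t).getD j 0
      = t.getD j 0 + ((l.map (fun c => card_to_num (String.ofList [c]) PySem.Dict.empty)).count (j : Int) : Int) := by
  induction l with
  | nil => intro t ht hl j hj; simp
  | cons c cs ih =>
    intro t ht hl j hj
    have hc := hl c (by simp)
    set m := (card_to_num (String.ofList [c]) PySem.Dict.empty).natAbs with hm
    have hmlt : m < 15 := by omega
    have hstep : tallyStep t c = t.set m (t.getD m 0 + 1) := rfl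
    have hlen : (t.set m (t.getD m 0 + 1)).length = 15 := by simp [ht]
    rw [List.foldl_cons, hstep,
      ih _ hlen (fun c hc => hl c (by simp [hc])) j hj]
    have hgetD : (t.set m (t.getD m 0 + 1)).getD j 0
        = if m = j then t.getD j 0 + 1 else t.getD j 0 := by
      rcases eq_or_ne m j with h | h
      · subst h
        rw [if_pos rfl, List.getD_eq_getElem?_getD, List.getElem?_set,
          if_pos rfl, if_pos (by omega)]
        simp [List.getD_eq_getElem?_getD]
      · rw [if_neg h, List.getD_eq_getElem?_getD, List.getElem?_set, if_neg h,
          ← List.getD_eq_getElem?_getD]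
    rw [hgetD]
    have hcount : ((c :: cs).map (fun c => card_to_num (String.ofList [c]) PySem.Dict.empty)).count (j : Int)
        = (cs.map (fun c => card_to_num (String.ofList [c]) PySem.Dict.empty)).count (j : Int) + if card_to_num (String.ofList [c]) PySem.Dict.empty = j then 1 else 0 := by
      simp [List.count_cons]
    rw [hcount]
    by_cases h : card_to_num (String.ofList [c]) PySem.Dict.empty = (j : Int)
    · have : m = j := by omega
      rw [if_pos this, if_pos h]
      push_cast
      ring
    · have : m ≠ j := by
        intro hmj; apply h; omega
      rw [if_neg this, if_neg h]
      push_cast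
      ring

-- the finished tally read back at a value 0 ≤ v < 15 is that value's count
lemma tally_getD (l : List Char)
    (hl : ∀ c ∈ l, 0 ≤ card_to_num (String.ofList [c]) PySem.Dict.empty ∧ card_to_num (String.ofList [c]) PySem.Dict.empty < 15) (v : Int)
    (hv0 : 0 ≤ v) (hv : v < 15) :
    PySem.List.pyGetD (l.foldl tallyStep (List.replicate 15 0)) v 0
      = ((l.map (fun c => card_to_num (String.ofList [c]) PySem.Dict.empty)).count v : Int) := by
  have hlen : (List.replicate (15 : Nat) (0 : Int)).length = 15 := by simp
  have hvj : ((v.toNat : Nat) : Int) = v := Int.toNat_of_nonneg hv0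
  rw [PySem.List.pyGetD_of_nonneg _ _ hv0,
    tally_inv l (List.replicate 15 0) hlen hl v.toNat (by omega), hvj,
    List.getD_eq_getElem?_getD, List.getElem?_replicate]
  split <;> simp

-- membership in the bucket emission
lemma bucket_mem (vals : List Int) (hv : ∀ x ∈ vals, 0 ≤ x ∧ x < 15) (p : Int × Int) :
    p ∈ bucket vals ↔ p.1 ∈ vals ∧ p.2 = (vals.count p.1 : Int) := by
  unfold bucket
  simp only [List.mem_flatMap, List.mem_map, List.mem_filter,
    PySem.List.mem_pyRange_neg_one, decide_eq_true_eq]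
  constructor
  · rintro ⟨k, ⟨hk0, hkn⟩, v, ⟨⟨hv1, hv14⟩, hcnt⟩, rfl⟩
    refine ⟨?_, hcnt.symm⟩
    have : 0 < vals.count v := by omega
    exact List.count_pos_iff.mp this
  · rintro ⟨hmem, hcnt⟩
    obtain ⟨hp0, hp15⟩ := hv p.1 hmem
    refine ⟨p.2, ⟨?_, ?_⟩, p.1, ⟨⟨by omega, by omega⟩, hcnt.symm⟩, rfl⟩
    · have : 0 < vals.count p.1 := List.count_pos_iff.mpr hmem
      omega
    · have : vals.count p.1 ≤ vals.length := List.count_le_length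
      omega

-- the bucket emission is strictly descending in the (count, value) key
lemma bucket_pairwise (vals : List Int) :
    (bucket vals).Pairwise (fun p q => pairKey q < pairKey p) := by
  unfold bucket
  rw [List.pairwise_flatMap]
  constructor
  · intro k _
    rw [List.pairwise_map]
    have hrange : (PySem.List.pyRange 14 (-1) (-1)).Pairwise (fun a b => b < a) := by
      rw [PySem.List.pyRange_neg_one_eq_reverse, List.pairwise_reverse]
      exact PySem.List.pairwise_lt_pyRange_one _ _
    refine (hrange.filter _).imp ?_
    intro a b hba
    unfold pairKey
    rw [Prod.Lex.toLex_lt_toLex]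
    right; exact ⟨rfl, hba⟩
  · have hks : (PySem.List.pyRange (vals.length : Int) 0 (-1)).Pairwise (fun a b => b < a) := by
      rw [PySem.List.pyRange_neg_one_eq_reverse, List.pairwise_reverse]
      exact PySem.List.pairwise_lt_pyRange_one _ _
    refine hks.imp ?_
    intro k1 k2 hlt x hx y hy
    simp only [List.mem_map, List.mem_filter] at hx hy
    obtain ⟨vx, _, rfl⟩ := hx
    obtain ⟨vy, _, rfl⟩ := hy
    unfold pairKey
    rw [Prod.Lex.toLex_lt_toLex]
    left; exact hlt

lemma bucket_nodup (vals : List Int) : (bucket vals).Nodup :=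
  (bucket_pairwise vals).imp (fun {p q} h => by
    intro hpq; subst hpq; exact lt_irrefl _ h)

-- ===== VERDICT (by name: the statement is the Claim_ definition above) =====
theorem make_card_counts_spec : Claim_equal_make_card_counts := by
  intro s _ hpre
  unfold Spec_make_card_counts make_card_counts make_card_counts_alt
  simp only []
  have hpre' : ∀ c ∈ s.toList,
      (c == 'A' || c == 'K' || c == 'Q' || c == 'J' || c == 'T' || c.isDigit) = true := by
    intro c hc
    exact List.all_eq_true.mp hpre c hc
  set vals := s.toList.map (fun c => card_to_num (String.ofList [c]) PySem.Dict.empty) with hvals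
  have hvalsc : vals = s.toList.map (fun c => card_to_num (String.ofList [c]) PySem.Dict.empty) := rfl
  have hrange : ∀ x ∈ vals, 0 ≤ x ∧ x < 15 := by
    intro x hx
    rw [hvalsc] at hx
    obtain ⟨c, hc, rfl⟩ := List.mem_map.mp hx
    exact card_val_range c (hpre' c hc)
  set sortedA := PySem.List.sorted vals (fun v => v) false with hsA
  have hpermA : sortedA.Perm vals := PySem.List.sorted_perm vals (fun v => v) false
  -- A's side: counter items sorted descending by the (count, value) key
  rw [fold_count_eq_counter, PySem.Dict.items_counter, before_eq,
    ← PySem.List.sorted_rev_eq_foldl_insertBy]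
  simp only [Prod.mk.eta, List.map_id']
  -- B's side: rewrite the two appending folds into the bucket flatMap
  have htally : ∀ v : Int, 0 ≤ v → v < 15 →
      PySem.List.pyGetD (s.toList.foldl tallyStep (List.replicate 15 0)) v 0
        = (vals.count v : Int) := by
    intro v h0 h15
    rw [hvalsc]
    exact tally_getD s.toList
      (fun c hc => card_val_range c (hpre' c hc)) v h0 h15
  have hinner : ∀ (k : Int) (acc : List (Int × Int)),
      (PySem.List.pyRange 14 (-1) (-1)).foldl (fun acc v =>
        if PySem.List.pyGetD (s.toList.foldl tallyStep (List.replicate 15 0)) v 0 == k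
        then acc ++ [(v, k)] else acc) acc
        = acc ++ ((PySem.List.pyRange 14 (-1) (-1)).filter
            (fun v => decide ((vals.count v : Int) = k))).map (fun v => (v, k)) := by
    intro k acc
    have hpq : ∀ v ∈ PySem.List.pyRange 14 (-1) (-1),
        (PySem.List.pyGetD (s.toList.foldl tallyStep (List.replicate 15 0)) v 0 == k)
          = decide ((vals.count v : Int) = k) := by
      intro v hvmem
      rw [PySem.List.mem_pyRange_neg_one] at hvmem
      rw [htally v (by omega) (by omega)]
      exact Bool.beq_eq_decide_eq _ _
    rw [PySem.List.foldl_append_if, List.filter_congr hpq]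
  have hlen : PySem.Str.len s = (vals.length : Int) := by
    rw [PySem.Str.len_eq, hvalsc, List.length_map]
  rw [hlen]
  have houter : (PySem.List.pyRange (vals.length : Int) 0 (-1)).foldl (fun acc k =>
      (PySem.List.pyRange 14 (-1) (-1)).foldl (fun acc v =>
        if PySem.List.pyGetD (s.toList.foldl tallyStep (List.replicate 15 0)) v 0 == k
        then acc ++ [(v, k)] else acc) acc) []
      = bucket vals := by
    have hfun : (fun (acc : List (Int × Int)) k =>
        (PySem.List.pyRange 14 (-1) (-1)).foldl (fun acc v =>
          if PySem.List.pyGetD (s.toList.foldl tallyStep (List.replicate 15 0)) v 0 == k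
          then acc ++ [(v, k)] else acc) acc)
        = fun acc k => acc ++ ((PySem.List.pyRange 14 (-1) (-1)).filter
            (fun v => decide ((vals.count v : Int) = k))).map (fun v => (v, k)) := by
      funext acc k
      exact hinner k acc
    rw [hfun, PySem.List.foldl_append_eq_flatMap]
    rfl
  rw [houter]
  -- both sides are the strictly-descending arrangement of the same nodup pair list
  apply PySem.List.sorted_rev_eq_of_perm_of_pairwise_gt _ _ pairKey ?_ (bucket_pairwise vals)
  -- permutation: same members, both nodup
  have hLnodup : ((PySem.Set.ofList sortedA).map
      (fun k => (k, (sortedA.count k : Int)))).Nodup := by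
    refine List.Nodup.map ?_ (PySem.Set.nodup_ofList sortedA)
    intro a b hab
    exact congrArg Prod.fst hab
  rw [List.perm_ext_iff_of_nodup (bucket_nodup vals) hLnodup]
  intro p
  rw [bucket_mem vals hrange p]
  simp only [List.mem_map, PySem.Set.mem_ofList]
  constructor
  · rintro ⟨hmem, hcnt⟩
    refine ⟨p.1, hpermA.mem_iff.mpr hmem, ?_⟩
    rw [hpermA.count_eq, ← hcnt]
  · rintro ⟨a, hmem, rfl⟩
    exact ⟨hpermA.mem_iff.mp hmem, by rw [hpermA.count_eq]⟩
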